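-- pv_equiv track=rewrite | github.com/prog2-ia/trabajo-final-c3 | Entidades/persona.py | validar_dni
-- ===== SOURCE A (Python) =====
-- def validar_dni(DNI:str) -> bool:
--     letras = ['T','R','W','A','G','M','Y','F','P','D','X','B','N','J','Z','S','Q','V','H','L','C','K','E']
--     dni=list(DNI)
--     correcto=True
--     numero=0
--     if len(dni)==9:
--         numeros=dni[0:8]
--         for i in numeros:
--             if not i.isdigit():
--                 correcto=False
--             else:
--                 numero=numero*10
--                 numero+=int(i)
--         if dni[8].upper()!= letras[numero%23]:
--             correcto=False
--     else:
--         correcto=False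
--     return correcto
-- ===== SOURCE B (Python) =====
-- def validar_dni(DNI: str) -> bool:
--     letras = 'TRWAGMYFPDXBNJZSQVHLCKE'
--     # positional weights: 10**(7-k) % 23 for the 8 digit positions
--     pesos = (14, 6, 19, 18, 11, 8, 10, 1)
--     if len(DNI) != 9 or not DNI[:8].isdigit():
--         return False
--     r = sum(p * (ord(c) - 48) for p, c in zip(pesos, DNI[:8])) % 23
--     return DNI[8].upper() == letras[r]
-- ===== Notes on version B (the rewrite author's own statement) =====
-- stated objective: alternative
-- what changed: Replaces A's digit-by-digit decimal accumulator loop with a mutable correcto flag by a guarded positional weighted checksum: early returns for length and a whole-prefix isdigit test, then one zip of the digits with the precomputed weights 10^(7-k) mod 23 summed and reduced mod 23 once, ending in a single letter comparison.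
import Mathlib
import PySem

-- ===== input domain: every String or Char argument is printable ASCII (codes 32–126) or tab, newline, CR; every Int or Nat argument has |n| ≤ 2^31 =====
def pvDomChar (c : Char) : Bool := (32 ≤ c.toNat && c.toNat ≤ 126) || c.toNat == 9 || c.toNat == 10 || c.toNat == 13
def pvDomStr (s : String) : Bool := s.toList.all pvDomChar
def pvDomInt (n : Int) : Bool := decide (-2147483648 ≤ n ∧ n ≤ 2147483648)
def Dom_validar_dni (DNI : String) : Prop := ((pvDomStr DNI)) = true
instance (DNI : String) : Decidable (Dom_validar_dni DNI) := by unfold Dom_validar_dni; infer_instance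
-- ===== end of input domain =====

-- B replaces A's flag-and-accumulator decimal loop by a guarded positional weighted checksum (precomputed 10^k mod 23 weights, one zip-sum, one mod): a different decomposition, same O(1) cost.


-- ===== PORT A =====
-- int(i) on a single char i is guarded by i.isdigit(); on the ASCII domain it never raises, ported as (ofChars? [i]).getD 0 (the default is unreachable on Dom).
def validar_dni (DNI : String) : Bool :=
  let letras : List Char := ['T','R','W','A','G','M','Y','F','P','D','X','B','N','J','Z','S','Q','V','H','L','C','K','E']
  let dni := DNI.toList
  let st : Bool × Int := (true, 0)   -- (correcto, numero)
  if dni.length = 9 then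
    let numeros := PySem.List.slice dni (some 0) (some 8)
    let st := numeros.foldl
      (fun st i =>
        if !(PySem.Chars.isdigit i) then (false, st.2)
        else (st.1, st.2 * 10 + (PySem.Int.ofChars? [i]).getD 0)) st
    if PySem.Chars.upperChar (PySem.List.pyGetD dni 8 ' ')
        ≠ PySem.List.pyGetD letras (PySem.Int.mod st.2 23) ' ' then false
    else st.1
  else false

-- ===== PORT B =====
def validar_dni_alt (DNI : String) : Bool :=
  let letras := "TRWAGMYFPDXBNJZSQVHLCKE".toList
  let pesos : List Int := [14, 6, 19, 18, 11, 8, 10, 1]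
  let cs := DNI.toList
  let head := PySem.List.slice cs none (some 8)
  if cs.length ≠ 9 || !(PySem.Chars.strIsdigit head) then false
  else
    let r := PySem.Int.mod (((pesos.zip head).map
      (fun pc => pc.1 * ((pc.2.toNat : Int) - 48))).sum) 23
    PySem.Chars.upperChar (PySem.List.pyGetD cs 8 ' ') == PySem.List.pyGetD letras r ' '

-- ===== PRECONDITION & SPEC =====
def Spec_validar_dni (DNI : String) (out : Bool) : Prop := out = validar_dni_alt DNI
instance (DNI : String) (out : Bool) : Decidable (Spec_validar_dni DNI out) := by unfold Spec_validar_dni; infer_instance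

-- ===== CLAIM =====
def Claim_equal_validar_dni : Prop := ∀ (DNI : String), Dom_validar_dni DNI → Spec_validar_dni DNI (validar_dni DNI)

-- ===== LEMMAS AND PROOFS =====

-- A's loop step and the plain numeric accumulator it computes on all-digit input
def pvStepA (st : Bool × Int) (i : Char) : Bool × Int :=
  if !(PySem.Chars.isdigit i) then (false, st.2)
  else (st.1, st.2 * 10 + (PySem.Int.ofChars? [i]).getD 0)

def pvNum (n : Int) (l : List Char) : Int :=
  l.foldl (fun n c => n * 10 + ((c.toNat : Int) - 48)) n

-- int('d') for an ASCII digit character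
theorem pvOfCharsDigit (c : Char) (h : PySem.Chars.isdigit c = true) :
    PySem.Int.ofChars? [c] = some ((c.toNat : Int) - 48) := by
  simp only [PySem.Chars.isdigit, Bool.and_eq_true, decide_eq_true_eq] at h
  obtain ⟨h1, h2⟩ := h
  have h1' : 48 ≤ c.toNat := h1
  have h2' : c.toNat ≤ 57 := h2
  have hc : c = Char.ofNat c.toNat := (Char.ofNat_toNat c).symm
  interval_cases h' : c.toNat <;> rw [hc] <;> decide

theorem pvFold1 (l : List Char) (b : Bool) (n : Int) :
    (l.foldl pvStepA (b, n)).1 = (b && l.all PySem.Chars.isdigit) := by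
  induction l generalizing b n with
  | nil => simp
  | cons c t ih =>
    by_cases hc : PySem.Chars.isdigit c = true <;>
      simp [pvStepA, hc, ih]

theorem pvFoldAllDigits (l : List Char) (b : Bool) (n : Int)
    (h : l.all PySem.Chars.isdigit = true) :
    l.foldl pvStepA (b, n) = (b, pvNum n l) := by
  induction l generalizing b n with
  | nil => simp [pvNum]
  | cons c t ih =>
    simp only [List.all_cons, Bool.and_eq_true] at h
    simp [pvStepA, h.1, pvOfCharsDigit c h.1, pvNum, ih _ _ h.2]

theorem pvModPos (a : Int) : PySem.Int.mod a 23 = a % 23 := by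
  simp [PySem.Int.mod, Int.fmod_eq_emod]

-- A's decimal accumulator and B's weighted checksum agree mod 23 on an 8-char head
theorem pvWeighted (c0 c1 c2 c3 c4 c5 c6 c7 : Char) :
    pvNum 0 [c0, c1, c2, c3, c4, c5, c6, c7] % 23 =
      ((([14, 6, 19, 18, 11, 8, 10, 1] : List Int).zip [c0, c1, c2, c3, c4, c5, c6, c7]).map
        (fun pc => pc.1 * ((pc.2.toNat : Int) - 48))).sum % 23 := by
  simp only [pvNum, List.foldl, List.zip, List.zipWith, List.map, List.sum_cons, List.sum_nil]
  omega

theorem pvBeqChar (a b : Char) : decide (a = b) = (a == b) := by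
  by_cases h : a = b <;> simp [h]

-- ===== VERDICT =====
theorem validar_dni_spec : Claim_equal_validar_dni := by
  intro DNI _
  unfold Spec_validar_dni validar_dni validar_dni_alt
  set cs := DNI.toList with hcs
  by_cases hlen : cs.length = 9
  · simp only [hlen]
    have hslice0 : PySem.List.slice cs (some 0) (some 8) = cs.take 8 := by
      rw [PySem.List.slice_zero_start, PySem.List.slice_to cs (by norm_num)]
      simp
    have hslice : PySem.List.slice cs none (some 8) = cs.take 8 := by
      rw [PySem.List.slice_to cs (by norm_num)]; simp
    rw [hslice0, hslice]
    have hstep : (fun (st : Bool × Int) (i : Char) =>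
        if !(PySem.Chars.isdigit i) then (false, st.2)
        else (st.1, st.2 * 10 + (PySem.Int.ofChars? [i]).getD 0)) = pvStepA := rfl
    rw [hstep]
    set head := cs.take 8 with hhead
    have hlen8 : head.length = 8 := by simp [hhead, hlen]
    have hne : head.isEmpty = false := by
      cases h0 : head with
      | nil => rw [h0] at hlen8; simp at hlen8
      | cons a t => rfl
    obtain ⟨c0, c1, c2, c3, c4, c5, c6, c7, heq⟩ :
        ∃ a b c d e f g h, head = [a, b, c, d, e, f, g, h] := by
      clear_value head
      rcases head with _|⟨a,_|⟨b,_|⟨c,_|⟨d,_|⟨e,_|⟨f,_|⟨g,_|⟨h,_|⟨i,t⟩⟩⟩⟩⟩⟩⟩⟩⟩ <;>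
        first
          | exact ⟨a, b, c, d, e, f, g, h, rfl⟩
          | simp at hlen8
    rw [heq] at hne ⊢
    by_cases hd : ([c0, c1, c2, c3, c4, c5, c6, c7].all PySem.Chars.isdigit) = true
    · rw [pvFoldAllDigits _ true 0 hd]
      have hmods := pvWeighted c0 c1 c2 c3 c4 c5 c6 c7
      simp only [PySem.Chars.strIsdigit, hne, hd, pvModPos, hmods]
      simp [pvBeqChar]
    · simp only [Bool.not_eq_true] at hd
      have hA := pvFold1 [c0, c1, c2, c3, c4, c5, c6, c7] true 0
      simp [hd] at hA
      simp [PySem.Chars.strIsdigit, hne, hd, hA]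
  · simp [hlen]
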